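-- pv_equiv track=rewrite | github.com/lyrisk216/realthinkProject | RT24秋魔术B/life guards.py | get_work_time_by_fire_you
-- ===== SOURCE A (Python) =====
-- def get_work_time_by_fire_you(gList, fId):
--     bList = [0] * 1000
--     for i in range(len(gList)):
--         if i == fId:
--             continue
--         for t in range(gList[i][0], gList[i][1]):
--             bList[t] = 1
--     return sum(bList)
-- ===== SOURCE B (Python) =====
-- def get_work_time_by_fire_you(gList, fId):
--     # Difference array over the day's 1000 time slots: O(1) per guard,
--     # then one prefix-sum scan counting the covered slots.
--     diff = [0] * 1001
--     for i, g in enumerate(gList):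
--         if i != fId and g[0] < g[1]:
--             diff[g[0]] += 1
--             diff[g[1]] -= 1
--     covered = 0
--     cur = 0
--     for d in diff[:1000]:
--         cur += d
--         if cur > 0:
--             covered += 1
--     return covered
-- ===== Notes on version B (the rewrite author's own statement) =====
-- stated objective: alternative
-- what changed: Replaces per-time-unit marking of a 1000-entry indicator array (one write per covered slot per guard) with a difference array updated in O(1) per guard followed by a single positive-prefix-sum scan; Pre_ restricts to the natural domain (rows with at least 2 entries for non-fired guards, nonempty intervals within [0, 1000]): outside it A either raises IndexError or, for negative start times, silently marks end-of-day slots via Python's negative-index wraparound.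
-- outside the precondition, e.g. on get_work_time_by_fire_you([[-3, 2]], 5): A returns 5, B returns 0
import Mathlib
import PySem

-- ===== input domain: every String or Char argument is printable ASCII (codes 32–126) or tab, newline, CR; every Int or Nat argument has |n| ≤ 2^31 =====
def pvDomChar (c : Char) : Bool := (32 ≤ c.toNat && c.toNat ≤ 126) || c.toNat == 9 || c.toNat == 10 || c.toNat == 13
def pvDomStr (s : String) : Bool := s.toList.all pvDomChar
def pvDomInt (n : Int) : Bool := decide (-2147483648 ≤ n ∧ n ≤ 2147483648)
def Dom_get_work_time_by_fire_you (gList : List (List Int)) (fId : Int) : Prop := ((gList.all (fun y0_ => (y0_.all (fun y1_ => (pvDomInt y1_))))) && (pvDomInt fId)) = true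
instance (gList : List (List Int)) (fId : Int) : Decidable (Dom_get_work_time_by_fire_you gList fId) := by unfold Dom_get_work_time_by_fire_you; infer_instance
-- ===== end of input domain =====

-- B replaces A's per-time-unit marking of a 1000-slot indicator array by a
-- difference array (two O(1) updates per guard) plus one prefix-sum scan.

-- ===== PORT A =====
def get_work_time_by_fire_you (gList : List (List Int)) (fId : Int) : Int :=
  let bList0 : List Int := List.replicate 1000 0
  let bList := (PySem.List.pyRange 0 (gList.length : Int) 1).foldl
    (fun bList i =>
      if i = fId then bList
      else
        (PySem.List.pyRange (PySem.List.pyGetD (PySem.List.pyGetD gList i []) 0 0)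
            (PySem.List.pyGetD (PySem.List.pyGetD gList i []) 1 0) 1).foldl
          (fun bList t => PySem.List.pySetD bList t 1) bList)
    bList0
  bList.sum

-- ===== PORT B =====
-- `d[j] += v` on a Python list
def incAt (d : List Int) (j v : Int) : List Int :=
  PySem.List.pySetD d j (PySem.List.pyGetD d j 0 + v)

def get_work_time_by_fire_you_alt (gList : List (List Int)) (fId : Int) : Int :=
  let diff0 : List Int := List.replicate 1001 0
  let diff := (PySem.List.enumerate gList 0).foldl
    (fun diff p =>
      if p.1 ≠ fId ∧ PySem.List.pyGetD p.2 0 0 < PySem.List.pyGetD p.2 1 0 then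
        incAt (incAt diff (PySem.List.pyGetD p.2 0 0) 1) (PySem.List.pyGetD p.2 1 0) (-1)
      else diff)
    diff0
  let scan := (PySem.List.slice diff none (some 1000)).foldl
    (fun (st : Int × Int) d =>
      let cur := st.1 + d
      (cur, if 0 < cur then st.2 + 1 else st.2))
    (0, 0)
  scan.2

-- ===== PRECONDITION & SPEC =====
-- Pre_ restricts to the task's natural domain: every non-fired guard row has at
-- least 2 entries and its nonempty interval lies within the day [0, 1000].
-- Outside it A either raises IndexError (short row, or a time past index 999 /
-- below -1000) or, for a negative start time, silently marks end-of-day slots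
-- through Python's negative-index wraparound — an accident of A's implementation.
def Pre_get_work_time_by_fire_you (gList : List (List Int)) (fId : Int) : Prop :=
  ∀ p ∈ PySem.List.enumerate gList 0, p.1 ≠ fId →
    2 ≤ p.2.length ∧
      (PySem.List.pyGetD p.2 0 0 < PySem.List.pyGetD p.2 1 0 →
        0 ≤ PySem.List.pyGetD p.2 0 0 ∧ PySem.List.pyGetD p.2 1 0 ≤ 1000)
instance (gList : List (List Int)) (fId : Int) : Decidable (Pre_get_work_time_by_fire_you gList fId) := by
  unfold Pre_get_work_time_by_fire_you; infer_instance

def pvWitness_get_work_time_by_fire_you : List (List Int) × Int := ([[0, 2], [3, 7]], 2)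

def Spec_get_work_time_by_fire_you (gList : List (List Int)) (fId : Int) (out : Int) : Prop :=
  out = get_work_time_by_fire_you_alt gList fId
instance (gList : List (List Int)) (fId : Int) (out : Int) : Decidable (Spec_get_work_time_by_fire_you gList fId out) := by
  unfold Spec_get_work_time_by_fire_you; infer_instance

-- ===== CLAIM (what is proved, stated in full; the proofs are below) =====
def Claim_equal_get_work_time_by_fire_you : Prop := ∀ (gList : List (List Int)) (fId : Int), Dom_get_work_time_by_fire_you gList fId → Pre_get_work_time_by_fire_you gList fId → Spec_get_work_time_by_fire_you gList fId (get_work_time_by_fire_you gList fId)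

-- ===== LEMMAS AND PROOFS =====

-- notation for the i-th guard's data (i : Int, Python indexing through pyGetD)
def pvG (gList : List (List Int)) (i : Int) : List Int := PySem.List.pyGetD gList i []
def pvA (gList : List (List Int)) (i : Int) : Int := PySem.List.pyGetD (pvG gList i) 0 0
def pvB (gList : List (List Int)) (i : Int) : Int := PySem.List.pyGetD (pvG gList i) 1 0

-- guard i (not fired) covers slot t
def pvCov (gList : List (List Int)) (fId : Int) (i t : Int) : Bool :=
  decide (¬ i = fId) && decide (pvA gList i ≤ t) && decide (t < pvB gList i)

-- some of the first m guards covers slot t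
def pvCovm (gList : List (List Int)) (fId : Int) (m : Nat) (t : Nat) : Bool :=
  (PySem.List.pyRange 0 (m : Int) 1).any (fun i => pvCov gList fId i t)

-- how many of the first m guards cover slot t
def pvCnt (gList : List (List Int)) (fId : Int) (m t : Nat) : Nat :=
  (PySem.List.pyRange 0 (m : Int) 1).countP (fun i => pvCov gList fId i t)

-- what Pre_ gives about every non-fired guard
def pvHok (gList : List (List Int)) (fId : Int) : Prop :=
  ∀ k : Nat, k < gList.length → ((k : Int) ≠ fId) →
    (pvA gList k < pvB gList k → 0 ≤ pvA gList k ∧ pvB gList k ≤ 1000)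

lemma hok_of_pre (gList : List (List Int)) (fId : Int)
    (hpre : Pre_get_work_time_by_fire_you gList fId) : pvHok gList fId := by
  intro k hk hkf hab
  have hmem : ((k : Int), gList[k]) ∈ PySem.List.enumerate gList 0 := by
    rw [PySem.List.mem_enumerate_iff]
    exact ⟨k, hk, by simp⟩
  have hg : pvG gList (k : Int) = gList[k] := by
    simp [pvG, hk]
  have hA : pvA gList k = PySem.List.pyGetD gList[k] 0 0 := by rw [pvA, hg]
  have hB : pvB gList k = PySem.List.pyGetD gList[k] 1 0 := by rw [pvB, hg]
  obtain ⟨-, hbd⟩ := hpre _ hmem hkf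
  rw [hA, hB]
  exact hbd (by rw [← hA, ← hB]; omega)

lemma set_map_range (n k : Nat) (f : Nat → Int) (v : Int) :
    ((List.range n).map f).set k v
      = (List.range n).map (fun t => if t = k ∧ k < n then v else f t) := by
  apply List.ext_getElem
  · simp
  · intro i h1 h2
    have hn : i < n := by simpa using h1
    by_cases hik : i = k
    · subst hik
      simp [hn]
    · simp [hik, Ne.symm hik]

lemma sum_set_add (l : List Int) (j : Nat) (v : Int) (h : j < l.length) :
    (l.set j (l[j] + v)).sum = l.sum + v := by
  induction l generalizing j with
  | nil => simp at h
  | cons x xs ih =>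
    cases j with
    | zero => simp [List.set]; ring
    | succ j =>
      have hj : j < xs.length := by simpa using h
      simp only [List.set, List.getElem_cons_succ, List.sum_cons, ih j hj]; ring

lemma sum_take_set_add (d : List Int) (j : Nat) (v : Int) (T : Nat) (h : j < d.length) :
    ((d.set j (d[j] + v)).take T).sum = (d.take T).sum + (if j < T then v else 0) := by
  by_cases hT : j < T
  · have hj : j < (d.take T).length := by simp [h, hT]
    have hg : d[j] = (d.take T)[j] := by simp [List.getElem_take]
    rw [List.take_set, hg, sum_set_add _ _ _ hj]
    simp [hT]
  · rw [List.take_set_of_le (by omega)]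
    simp [hT]

lemma sum_take_incAt (d : List Int) (j v : Int) (T : Nat) (h0 : 0 ≤ j) (h : j.toNat < d.length) :
    ((incAt d j v).take T).sum = (d.take T).sum + (if j < (T : Int) then v else 0) := by
  have hget : PySem.List.pyGetD d j 0 = d[j.toNat] :=
    PySem.List.pyGetD_eq_getElem d 0 h0 (by omega)
  have hcond : (j < (T : Int)) ↔ (j.toNat < T) := by omega
  rw [incAt, PySem.List.pySetD_of_nonneg _ _ h0, hget, sum_take_set_add _ _ _ _ h]
  simp only [hcond]

lemma length_incAt (d : List Int) (j v : Int) : (incAt d j v).length = d.length := by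
  simp [incAt, PySem.List.length_pySetD]

-- A's inner loop: marking [a, b) on the indicator array, for a day-bounded interval
lemma mark_fold (p : Nat → Bool) (a b : Int) (h : a < b → 0 ≤ a ∧ b ≤ 1000) :
    (PySem.List.pyRange a b 1).foldl (fun l t => PySem.List.pySetD l t 1)
        ((List.range 1000).map fun t => if p t then (1 : Int) else 0)
      = (List.range 1000).map
          fun (t : Nat) => if (decide (a ≤ (t : Int)) && decide ((t : Int) < b)) || p t
            then (1 : Int) else 0 := by
  have key : ∀ k : Nat, ∀ (a : Int) (p : Nat → Bool), (b - a).toNat = k →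
      (a < b → 0 ≤ a ∧ b ≤ 1000) →
      (PySem.List.pyRange a b 1).foldl (fun l t => PySem.List.pySetD l t 1)
          ((List.range 1000).map fun t => if p t then (1 : Int) else 0)
        = (List.range 1000).map
            fun (t : Nat) => if (decide (a ≤ (t : Int)) && decide ((t : Int) < b)) || p t
              then (1 : Int) else 0 := by
    intro k
    induction k with
    | zero =>
      intro a p hk h
      have hba : b ≤ a := by omega
      rw [PySem.List.pyRange_one_eq_nil hba, List.foldl_nil]
      apply List.map_congr_left
      intro t _
      have hs : (decide (a ≤ (t : Int)) && decide ((t : Int) < b)) = false := by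
        simp only [← Bool.decide_and, decide_eq_false_iff_not]
        omega
      rw [hs, Bool.false_or]
    | succ k ih =>
      intro a p hk h
      have hab : a < b := by omega
      obtain ⟨ha0, hb1000⟩ := h hab
      have ha1000 : a.toNat < 1000 := by omega
      rw [PySem.List.pyRange_one_cons hab, List.foldl_cons,
        PySem.List.pySetD_of_nonneg _ _ ha0, set_map_range]
      have hshape : (List.range 1000).map
            (fun t => if t = a.toNat ∧ a.toNat < 1000 then (1 : Int) else if p t then 1 else 0)
          = (List.range 1000).map
            (fun t => if ((t == a.toNat) || p t) then (1 : Int) else 0) := by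
        apply List.map_congr_left
        intro t _
        by_cases h1 : t = a.toNat <;> simp [h1, ha1000]
      rw [hshape, ih (a + 1) (fun t => (t == a.toNat) || p t) (by omega)
        (fun _ => ⟨by omega, hb1000⟩)]
      apply List.map_congr_left
      intro t _
      have htj : ((t == a.toNat) : Bool) = decide (t = a.toNat) := by
        by_cases h1 : t = a.toNat <;> simp [h1]
      rw [htj]
      by_cases hp : p t
      · simp [hp]
      · simp only [hp, Bool.or_false]
        have hiff : ((decide (a + 1 ≤ (t : Int)) && decide ((t : Int) < b)) || decide (t = a.toNat))
            = (decide (a ≤ (t : Int)) && decide ((t : Int) < b)) := by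
          simp only [← Bool.decide_and, ← Bool.decide_or, decide_eq_decide]
          omega
        rw [hiff]
  exact key (b - a).toNat a p rfl h

-- A's outer loop invariant
lemma A_fold (gList : List (List Int)) (fId : Int) (hok : pvHok gList fId) :
    ∀ m : Nat, m ≤ gList.length →
      (PySem.List.pyRange 0 (m : Int) 1).foldl
          (fun bList i =>
            if i = fId then bList
            else
              (PySem.List.pyRange (PySem.List.pyGetD (PySem.List.pyGetD gList i []) 0 0)
                  (PySem.List.pyGetD (PySem.List.pyGetD gList i []) 1 0) 1).foldl
                (fun bList t => PySem.List.pySetD bList t 1) bList)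
          (List.replicate 1000 0)
        = (List.range 1000).map (fun t => if pvCovm gList fId m t then (1 : Int) else 0) := by
  intro m
  induction m with
  | zero =>
    intro _
    rw [show ((0 : Nat) : Int) = 0 by rfl, PySem.List.pyRange_one_eq_nil le_rfl, List.foldl_nil]
    have hmap : (List.range 1000).map (fun t => if pvCovm gList fId 0 t then (1 : Int) else 0)
        = (List.range 1000).map (fun _ => (0 : Int)) := by
      apply List.map_congr_left
      intro t _
      simp [pvCovm, PySem.List.pyRange_one_eq_nil le_rfl]
    rw [hmap, List.map_const', List.length_range]
  | succ m ih =>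
    intro hm
    have hm' : m ≤ gList.length := by omega
    have hcast : ((m + 1 : Nat) : Int) = (m : Int) + 1 := by push_cast; ring
    rw [hcast, PySem.List.pyRange_one_succ_right (by positivity), List.foldl_append,
      ih hm', List.foldl_cons, List.foldl_nil]
    have hcovm : ∀ t : Nat, pvCovm gList fId (m + 1) t
        = (pvCovm gList fId m t || pvCov gList fId (m : Int) t) := by
      intro t
      unfold pvCovm
      rw [hcast, PySem.List.pyRange_one_succ_right (by positivity), List.any_append]
      simp
    by_cases hf : (m : Int) = fId
    · rw [if_pos hf]
      apply List.map_congr_left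
      intro t _
      have : pvCov gList fId (m : Int) t = false := by
        simp [pvCov, hf]
      simp [hcovm, this]
    · rw [if_neg hf]
      have hcov : ∀ t : Int, pvCov gList fId (m : Int) t
          = (decide (pvA gList (m : Int) ≤ t) && decide (t < pvB gList (m : Int))) := by
        intro t
        simp [pvCov, hf]
      rw [show PySem.List.pyGetD (PySem.List.pyGetD gList (m : Int) []) 0 0 = pvA gList (m : Int) from rfl,
        show PySem.List.pyGetD (PySem.List.pyGetD gList (m : Int) []) 1 0 = pvB gList (m : Int) from rfl]
      rw [mark_fold (fun t => pvCovm gList fId m t)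
        (pvA gList (m : Int)) (pvB gList (m : Int)) (hok m (by omega) hf)]
      apply List.map_congr_left
      intro t _
      rw [hcovm, hcov, Bool.or_comm]

-- B's first loop body, with the enumerate pair already resolved to index i
def Bstep (gList : List (List Int)) (fId : Int) (diff : List Int) (i : Int) : List Int :=
  if i ≠ fId ∧ pvA gList i < pvB gList i then
    incAt (incAt diff (pvA gList i) 1) (pvB gList i) (-1)
  else diff

-- B's first loop invariant: prefix sums of the difference array count covering guards
lemma B_fold (gList : List (List Int)) (fId : Int) (hok : pvHok gList fId) :
    ∀ m : Nat, m ≤ gList.length →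
      ((PySem.List.pyRange 0 (m : Int) 1).foldl (Bstep gList fId) (List.replicate 1001 0)).length = 1001 ∧
        ∀ t : Nat, t < 1000 →
          (((PySem.List.pyRange 0 (m : Int) 1).foldl (Bstep gList fId)
              (List.replicate 1001 0)).take (t + 1)).sum = (pvCnt gList fId m t : Int) := by
  intro m
  induction m with
  | zero =>
    intro _
    rw [show ((0 : Nat) : Int) = 0 by rfl, PySem.List.pyRange_one_eq_nil le_rfl, List.foldl_nil]
    refine ⟨by rw [List.length_replicate], ?_⟩
    intro t _
    rw [List.take_replicate, List.sum_replicate, smul_zero]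
    simp [pvCnt, PySem.List.pyRange_one_eq_nil le_rfl]
  | succ m ih =>
    intro hm
    have hm' : m ≤ gList.length := by omega
    obtain ⟨ihlen, ihsum⟩ := ih hm'
    have hcast : ((m + 1 : Nat) : Int) = (m : Int) + 1 := by push_cast; ring
    rw [hcast, PySem.List.pyRange_one_succ_right (by positivity), List.foldl_append,
      List.foldl_cons, List.foldl_nil]
    have hcnt : ∀ t : Nat, (pvCnt gList fId (m + 1) t : Int)
        = (pvCnt gList fId m t : Int)
          + (if pvCov gList fId (m : Int) t then 1 else 0) := by
      intro t
      unfold pvCnt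
      rw [hcast, PySem.List.pyRange_one_succ_right (by positivity), List.countP_append]
      by_cases hc : pvCov gList fId (m : Int) t <;> simp [hc]
    set d := (PySem.List.pyRange 0 (m : Int) 1).foldl (Bstep gList fId) (List.replicate 1001 0)
      with hd
    unfold Bstep
    by_cases hc : (m : Int) ≠ fId ∧ pvA gList (m : Int) < pvB gList (m : Int)
    · rw [if_pos hc]
      obtain ⟨hf, hab⟩ := hc
      obtain ⟨ha0, hb1000⟩ := hok m (by omega) hf hab
      have halen : (pvA gList (m : Int)).toNat < d.length := by rw [ihlen]; omega
      have hblen : (pvB gList (m : Int)).toNat < (incAt d (pvA gList (m : Int)) 1).length := by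
        rw [length_incAt, ihlen]; omega
      refine ⟨by rw [length_incAt, length_incAt, ihlen], ?_⟩
      intro t ht
      have hcov : pvCov gList fId (m : Int) t
          = (decide (pvA gList (m : Int) ≤ (t : Int)) && decide ((t : Int) < pvB gList (m : Int))) := by
        simp [pvCov, hf]
      rw [sum_take_incAt _ _ _ _ (by omega) hblen, sum_take_incAt _ _ _ _ ha0 halen,
        ihsum t ht, hcnt t, hcov]
      simp only [Bool.and_eq_true, decide_eq_true_eq]
      push_cast
      split_ifs <;> omega
    · rw [if_neg hc]
      refine ⟨ihlen, ?_⟩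
      intro t ht
      have hcov : pvCov gList fId (m : Int) t = false := by
        simp only [pvCov, Bool.and_eq_false_iff]
        by_cases hf : (m : Int) = fId
        · left; left; simp [hf]
        · have hab : ¬ pvA gList (m : Int) < pvB gList (m : Int) := fun h => hc ⟨hf, h⟩
          by_cases h1 : pvA gList (m : Int) ≤ (t : Int)
          · right; simp; omega
          · left; right; simp [h1]
      rw [ihsum t ht, hcnt t, hcov]
      simp
-- B's scan loop, in general form
lemma scan_spec : ∀ (l : List Int) (c tot : Int),
    (l.foldl (fun (st : Int × Int) d =>
        (st.1 + d, if 0 < st.1 + d then st.2 + 1 else st.2)) (c, tot)).2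
      = tot + ((List.range l.length).countP (fun t => 0 < c + (l.take (t + 1)).sum) : Int) := by
  intro l
  induction l with
  | nil => intro c tot; simp
  | cons d l ih =>
    intro c tot
    simp only [List.foldl_cons]
    rw [ih]
    have hcong : (List.range l.length).countP
          (fun t => decide (0 < c + ((d :: l).take (t.succ + 1)).sum))
        = (List.range l.length).countP (fun t => decide (0 < (c + d) + (l.take (t + 1)).sum)) := by
      apply List.countP_congr
      intro t _
      simp only [List.take_succ_cons, List.sum_cons, decide_eq_true_eq]
      omega
    simp only [List.length_cons, List.range_succ_eq_map, List.countP_cons, List.countP_map,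
      Function.comp_def]
    rw [hcong]
    simp only [List.take_succ_cons, List.take_zero, List.sum_cons, List.sum_nil, add_zero]
    by_cases h : 0 < c + d
    all_goals simp [h]
    all_goals try ring

lemma covm_iff_cnt (gList : List (List Int)) (fId : Int) (m t : Nat) :
    pvCovm gList fId m t = true ↔ 0 < pvCnt gList fId m t := by
  unfold pvCovm pvCnt
  rw [List.any_eq_true, List.countP_pos_iff]

-- ===== VERDICT (by name: the statement is the Claim_ definition above) =====
theorem get_work_time_by_fire_you_spec : Claim_equal_get_work_time_by_fire_you := by
  intro gList fId hdom hpre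
  unfold Spec_get_work_time_by_fire_you
  have hok := hok_of_pre gList fId hpre
  obtain ⟨hBlen, hBsum⟩ := B_fold gList fId hok gList.length le_rfl
  -- A's value
  have hA : get_work_time_by_fire_you gList fId
      = ((List.range 1000).map
          (fun t => if pvCovm gList fId gList.length t then (1 : Int) else 0)).sum := by
    show ((PySem.List.pyRange 0 (gList.length : Int) 1).foldl
        (fun bList i =>
          if i = fId then bList
          else
            (PySem.List.pyRange (PySem.List.pyGetD (PySem.List.pyGetD gList i []) 0 0)
                (PySem.List.pyGetD (PySem.List.pyGetD gList i []) 1 0) 1).foldl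
              (fun bList t => PySem.List.pySetD bList t 1) bList)
        (List.replicate 1000 0)).sum = _
    rw [A_fold gList fId hok gList.length le_rfl]
  rw [hA, PySem.List.sum_map_ite_one_zero]
  -- B's value
  have halt : get_work_time_by_fire_you_alt gList fId
      = ((((PySem.List.pyRange 0 (gList.length : Int) 1).foldl (Bstep gList fId)
            (List.replicate 1001 0)).take 1000).foldl
          (fun (st : Int × Int) d =>
            (st.1 + d, if 0 < st.1 + d then st.2 + 1 else st.2)) (0, 0)).2 := by
    show ((PySem.List.slice
        ((PySem.List.enumerate gList 0).foldl
          (fun diff p =>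
            if p.1 ≠ fId ∧ PySem.List.pyGetD p.2 0 0 < PySem.List.pyGetD p.2 1 0 then
              incAt (incAt diff (PySem.List.pyGetD p.2 0 0) 1) (PySem.List.pyGetD p.2 1 0) (-1)
            else diff)
          (List.replicate 1001 0)) none (some 1000)).foldl
          (fun (st : Int × Int) d =>
            let cur := st.1 + d
            (cur, if 0 < cur then st.2 + 1 else st.2)) (0, 0)).2 = _
    rw [PySem.List.enumerate_eq_map_pyRange gList ([] : List Int), List.foldl_map,
      PySem.List.slice_to _ (by norm_num)]
    rfl
  rw [halt, scan_spec]
  set D := (PySem.List.pyRange 0 (gList.length : Int) 1).foldl (Bstep gList fId)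
      (List.replicate 1001 0) with hD
  have hlen : (D.take 1000).length = 1000 := by
    rw [List.length_take, hBlen]
    omega
  rw [hlen]
  have hcount : List.countP
        (fun t => decide (0 < (0 : Int) + ((D.take 1000).take (t + 1)).sum)) (List.range 1000)
      = List.countP (fun t => pvCovm gList fId gList.length t) (List.range 1000) := by
    apply List.countP_congr
    intro t ht
    have ht' : t < 1000 := List.mem_range.mp ht
    have hmin : min (t + 1) 1000 = t + 1 := by omega
    rw [List.take_take, hmin, hBsum t ht', zero_add]
    have hiff := covm_iff_cnt gList fId gList.length t
    cases hcv : pvCovm gList fId gList.length t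
    · rw [hcv] at hiff
      simp only [Bool.false_eq_true, false_iff, not_lt, Nat.le_zero] at hiff
      simp [hiff]
    · rw [hcv] at hiff
      have h1 : 0 < pvCnt gList fId gList.length t := hiff.mp rfl
      simp
      exact h1
  rw [hcount, zero_add]
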